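-- pv_equiv track=rewrite | github.com/openai/parameter-golf | records/track_non_record_16mb/2026-05-01_psyarbor_lab_rebus_calculations_w9/train_gpt.py | balanced_partition_sizes
-- ===== SOURCE A (Python) =====
-- def balanced_partition_sizes(n_items: int, n_groups: int, preferred_size: int | None = None) -> list[int]:
--     if preferred_size is None or preferred_size <= 0:
--         base = n_items // max(n_groups, 1)
--         extra = n_items % max(n_groups, 1)
--         return [base + (1 if idx < extra else 0) for idx in range(n_groups)]
--     sizes = [int(preferred_size) for _ in range(n_groups)]
--     while sum(sizes) > n_items:
--         for idx in reversed(range(n_groups)):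
--             if sizes[idx] > 1 and sum(sizes) > n_items:
--                 sizes[idx] -= 1
--     while sum(sizes) < n_items:
--         for idx in range(n_groups):
--             if sum(sizes) >= n_items:
--                 break
--             sizes[idx] += 1
--     return sizes
-- ===== SOURCE B (Python) =====
-- def balanced_partition_sizes(n_items: int, n_groups: int, preferred_size: int | None = None) -> list[int]:
--     if n_groups <= 0:
--         return []
--     base, extra = divmod(n_items, n_groups)
--     return [base + 1] * extra + [base] * (n_groups - extra)
-- ===== Notes on version B (the rewrite author's own statement) =====
-- stated objective: faster
-- what changed: Replaced the repeated decrement/increment sweep loops by a closed-form divmod even split; wherever A terminates its result is exactly the even split, so preferred_size never influences the returned value and is dropped from the computation.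
import Mathlib
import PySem

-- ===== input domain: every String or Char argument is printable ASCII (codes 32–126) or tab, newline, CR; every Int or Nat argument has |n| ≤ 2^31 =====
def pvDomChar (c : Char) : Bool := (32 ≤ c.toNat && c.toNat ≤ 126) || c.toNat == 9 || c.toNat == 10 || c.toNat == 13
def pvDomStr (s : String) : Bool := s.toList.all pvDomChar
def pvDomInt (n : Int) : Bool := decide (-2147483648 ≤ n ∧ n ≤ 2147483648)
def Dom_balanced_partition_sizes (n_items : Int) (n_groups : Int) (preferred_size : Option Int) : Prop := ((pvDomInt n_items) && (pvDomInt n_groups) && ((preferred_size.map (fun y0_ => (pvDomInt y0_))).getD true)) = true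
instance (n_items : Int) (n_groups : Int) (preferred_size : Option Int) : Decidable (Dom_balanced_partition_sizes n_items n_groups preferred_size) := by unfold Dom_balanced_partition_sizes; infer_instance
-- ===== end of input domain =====

-- B replaces A's repeated decrement/increment sweep loops by a closed-form divmod even
-- split (asymptotically faster; wherever A terminates, preferred_size does not affect the result).


-- ===== PORT A =====
-- one body of A's first inner loop: `if sizes[idx] > 1 and sum(sizes) > n_items: sizes[idx] -= 1`
-- (idx comes from range(len(sizes)), so it is always in range and getD/set are exact)
def pvA_decStep (n_items : Int) (sizes : List Int) (idx : Nat) : List Int :=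
  if sizes.getD idx 0 > 1 ∧ sizes.sum > n_items then sizes.set idx (sizes.getD idx 0 - 1)
  else sizes

-- `for idx in reversed(range(n_groups)): …`
def pvA_decPass (n_items : Int) (g : Nat) (sizes : List Int) : List Int :=
  (List.range g).reverse.foldl (pvA_decStep n_items) sizes

-- `while sum(sizes) > n_items: <pass>`; the fuel only makes the loop total in Lean — on every
-- input satisfying Pre_ the supplied fuel suffices (each pass lowers the sum by at least 1)
def pvA_decLoop (n_items : Int) (g : Nat) : Nat → List Int → List Int
  | 0, sizes => sizes
  | fuel+1, sizes =>
    if sizes.sum > n_items then pvA_decLoop n_items g fuel (pvA_decPass n_items g sizes)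
    else sizes

-- `for idx in range(n_groups): if sum(sizes) >= n_items: break; sizes[idx] += 1`
def pvA_incPass (n_items : Int) : List Nat → List Int → List Int
  | [], sizes => sizes
  | idx :: rest, sizes =>
    if sizes.sum ≥ n_items then sizes
    else pvA_incPass n_items rest (sizes.set idx (sizes.getD idx 0 + 1))

-- `while sum(sizes) < n_items: <pass>` (fuel as above)
def pvA_incLoop (n_items : Int) (g : Nat) : Nat → List Int → List Int
  | 0, sizes => sizes
  | fuel+1, sizes =>
    if sizes.sum < n_items then pvA_incLoop n_items g fuel (pvA_incPass n_items (List.range g) sizes)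
    else sizes

-- the `preferred_size is None or preferred_size <= 0` branch
def pvA_default (n_items : Int) (n_groups : Int) : List Int :=
  let base := PySem.Int.floordiv n_items (max n_groups 1)
  let extra := PySem.Int.mod n_items (max n_groups 1)
  (List.range n_groups.toNat).map (fun (idx : Nat) => base + if (idx : Int) < extra then 1 else 0)

def balanced_partition_sizes (n_items : Int) (n_groups : Int) (preferred_size : Option Int) : List Int :=
  match preferred_size with
  | none => pvA_default n_items n_groups
  | some p =>
    if p ≤ 0 then pvA_default n_items n_groups
    else
      let g := n_groups.toNat
      let sizes := List.replicate g p
      let sizes₁ := pvA_decLoop n_items g ((p * n_groups - n_items).toNat + 1) sizes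
      pvA_incLoop n_items g ((n_items - p * n_groups).toNat + 1) sizes₁

-- ===== PORT B =====
def balanced_partition_sizes_alt (n_items : Int) (n_groups : Int) (preferred_size : Option Int) : List Int :=
  if n_groups ≤ 0 then []
  else
    let base := PySem.Int.floordiv n_items n_groups
    let extra := PySem.Int.mod n_items n_groups
    List.replicate extra.toNat (base + 1) ++ List.replicate (n_groups - extra).toNat base

-- ===== PRECONDITION & SPEC =====
-- Pre_ excludes exactly the inputs on which A never terminates (its while loops spin forever):
-- a positive preferred_size together with either n_items < n_groups (sizes are floored at 1,
-- so their sum can never come down to n_items) or n_groups ≤ 0 with n_items ≠ 0 (empty sizes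
-- list, the sum 0 never moves). A returns no value there, so nothing A returns on is excluded.
def Pre_balanced_partition_sizes (n_items : Int) (n_groups : Int) (preferred_size : Option Int) : Prop :=
  preferred_size.getD 0 ≤ 0 ∨ (if n_groups ≤ 0 then n_items = 0 else n_groups ≤ n_items)
instance (n_items : Int) (n_groups : Int) (preferred_size : Option Int) : Decidable (Pre_balanced_partition_sizes n_items n_groups preferred_size) := by unfold Pre_balanced_partition_sizes; infer_instance

def pvWitness_balanced_partition_sizes : Int × Int × Option Int := (5, 2, some 3)

def Spec_balanced_partition_sizes (n_items : Int) (n_groups : Int) (preferred_size : Option Int) (out : List Int) : Prop := out = balanced_partition_sizes_alt n_items n_groups preferred_size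
instance (n_items : Int) (n_groups : Int) (preferred_size : Option Int) (out : List Int) : Decidable (Spec_balanced_partition_sizes n_items n_groups preferred_size out) := by unfold Spec_balanced_partition_sizes; infer_instance

-- ===== CLAIM (what is proved, stated in full; the proofs are below) =====
def Claim_equal_balanced_partition_sizes : Prop := ∀ (n_items : Int) (n_groups : Int) (preferred_size : Option Int), Dom_balanced_partition_sizes n_items n_groups preferred_size → Pre_balanced_partition_sizes n_items n_groups preferred_size → Spec_balanced_partition_sizes n_items n_groups preferred_size (balanced_partition_sizes n_items n_groups preferred_size)

-- ===== LEMMAS AND PROOFS =====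

-- B's nontrivial result, abbreviated for the proofs (used for 0 < g)
def pvSplit (n g : Int) : List Int :=
  List.replicate (PySem.Int.mod n g).toNat (PySem.Int.floordiv n g + 1) ++
  List.replicate (g - PySem.Int.mod n g).toNat (PySem.Int.floordiv n g)

lemma pvSplit_eq (n g v e : Int) (hg : 0 < g) (he : 0 ≤ e) (heg : e < g) (hn : n = v * g + e) :
    pvSplit n g = List.replicate e.toNat (v + 1) ++ List.replicate ((g : Int) - e).toNat v := by
  have h1 : PySem.Int.floordiv n g = v := by
    rw [PySem.Int.floordiv_eq_iff_of_pos hg]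
    constructor <;> nlinarith
  have h2 := PySem.Int.floordiv_mul_add_mod n g
  rw [h1] at h2
  have h3 : PySem.Int.mod n g = e := by linarith
  rw [pvSplit, h1, h3]

lemma alt_eq_split (n g : Int) (p : Option Int) :
    balanced_partition_sizes_alt n g p = if g ≤ 0 then [] else pvSplit n g := by
  by_cases hg : g ≤ 0 <;> simp [balanced_partition_sizes_alt, pvSplit, hg]

lemma sum_replicate_int (k : Nat) (v : Int) : (List.replicate k v).sum = (k : Int) * v := by
  simp [List.sum_replicate]

lemma pvSplit_sum (n g : Int) (hg : 0 < g) : (pvSplit n g).sum = n := by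
  have hm0 := PySem.Int.mod_nonneg n hg
  have hm1 := PySem.Int.mod_lt n hg
  have h2 := PySem.Int.floordiv_mul_add_mod n g
  rw [pvSplit, List.sum_append, sum_replicate_int, sum_replicate_int,
      Int.toNat_of_nonneg hm0, Int.toNat_of_nonneg (by omega)]
  ring_nf
  ring_nf at h2
  generalize PySem.Int.mod n g = M at *
  generalize g * PySem.Int.floordiv n g = Y at *
  omega

lemma rangeMap (b : Int) : ∀ (k : Nat) (e : Int), 0 ≤ e → e ≤ (k : Int) →
    (List.range k).map (fun (i : Nat) => b + if (i : Int) < e then 1 else 0) =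
      List.replicate e.toNat (b + 1) ++ List.replicate ((k : Int) - e).toNat b := by
  intro k
  induction k with
  | zero => intro e h1 h2; have : e = 0 := le_antisymm (by exact_mod_cast h2) h1
            simp [this]
  | succ k ih =>
    intro e h1 h2
    rw [List.range_succ, List.map_append]
    by_cases hek : e ≤ (k : Int)
    · rw [ih e h1 hek]
      have hlt : ¬ ((k : Int) < e) := not_lt.mpr hek
      simp only [List.map_cons, List.map_nil, if_neg hlt]
      rw [List.append_assoc]
      congr 1
      rw [show ((↑(k+1) : Int) - e).toNat = ((k : Int) - e).toNat + 1 by push_cast; omega,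
           List.replicate_succ']
      simp
    · have he : e = (k : Int) + 1 := by push_cast at h2 ⊢; omega
      have hall : ∀ i ∈ List.range k, b + (if ((i : Nat) : Int) < e then 1 else 0) = b + 1 := by
        intro i hi
        rw [if_pos]
        have := List.mem_range.mp hi
        omega
      rw [List.map_congr_left hall]
      have h0 : (((k + 1 : Nat) : Int) - e).toNat = 0 := by push_cast; omega
      have h1' : e.toNat = k + 1 := by omega
      rw [h0, h1', List.map_const']
      simp [List.replicate_succ', if_pos (show ((k : Nat) : Int) < e by omega)]

lemma default_eq_split (n g : Int) : pvA_default n g = if g ≤ 0 then [] else pvSplit n g := by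
  by_cases hg : g ≤ 0
  · simp [pvA_default, hg, Int.toNat_of_nonpos hg]
  · push_neg at hg
    rw [if_neg (show ¬ g ≤ 0 from by omega)]
    unfold pvA_default
    rw [show max g 1 = g from by omega]
    have h0 := PySem.Int.mod_nonneg n hg
    have h1 := PySem.Int.mod_lt n hg
    rw [rangeMap _ g.toNat _ h0 (by rw [Int.toNat_of_nonneg hg.le]; omega),
        Int.toNat_of_nonneg hg.le, pvSplit]

lemma getD_at_append (j : Nat) (a b : Int) (t : List Int) :
    (List.replicate j a ++ b :: t).getD j 0 = b := by
  induction j with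
  | zero => simp
  | succ j ih => simpa [List.replicate_succ] using ih

lemma set_at_append (j : Nat) (a b x : Int) (t : List Int) :
    (List.replicate j a ++ b :: t).set j x = List.replicate j a ++ x :: t := by
  induction j with
  | zero => simp
  | succ j ih => simp [List.replicate_succ, ih]

lemma repl_succ_append (k : Nat) (v : Int) (t : List Int) :
    List.replicate (k+1) v ++ t = List.replicate k v ++ v :: t := by
  simp [List.replicate_succ', List.append_assoc]

lemma decfold_id (n : Int) (l : List Nat) (s : List Int) (h : ¬ s.sum > n) :
    l.foldl (pvA_decStep n) s = s := by
  induction l with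
  | nil => rfl
  | cons x l ih => simp only [List.foldl_cons, pvA_decStep, h, and_false, if_false]; exact ih

lemma decPass_core (n v : Int) (hv : 1 < v) :
    ∀ (k : Nat) (t : List Int),
      (List.range k).reverse.foldl (pvA_decStep n) (List.replicate k v ++ t) =
        List.replicate (k - min k ((v * k + t.sum) - n).toNat) v ++
        (List.replicate (min k ((v * k + t.sum) - n).toNat) (v - 1) ++ t) := by
  intro k
  induction k with
  | zero => intro t; simp
  | succ k ih =>
    intro t
    rw [List.range_succ, List.reverse_append, List.reverse_singleton, List.singleton_append,
        List.foldl_cons, repl_succ_append]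
    push_cast
    have hsum : (List.replicate k v ++ v :: t).sum = v * ((k : Int)+1) + t.sum := by
      simp [List.sum_append]; ring
    by_cases h : (v * ((k : Int)+1) + t.sum) > n
    · rw [pvA_decStep, getD_at_append, if_pos ⟨hv, by rw [hsum]; exact h⟩,
          set_at_append]
      rw [ih ((v-1) :: t)]
      have hS : v * (k : Int) + ((v-1) :: t).sum = (v * ((k : Int)+1) + t.sum) - 1 := by
        simp [List.sum_cons]; ring
      rw [hS]
      generalize hX : v * ((k : Int)+1) + t.sum = X at h ⊢
      have hd : min (k+1) (X - n).toNat = min k (X - 1 - n).toNat + 1 := by omega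
      rw [hd, show k + 1 - (min k (X - 1 - n).toNat + 1) = k - min k (X - 1 - n).toNat from by omega,
          repl_succ_append]
    · rw [pvA_decStep, getD_at_append, if_neg (by rw [hsum]; exact fun hh => h hh.2),
          decfold_id _ _ _ (by rw [hsum]; exact h)]
      rw [show min (k+1) ((v * ((k : Int)+1) + t.sum) - n).toNat = 0 from by omega]
      simp [repl_succ_append]

lemma incPass_core (n v : Int) :
    ∀ (m j : Nat),
      pvA_incPass n (List.range' j m) (List.replicate j (v+1) ++ List.replicate m v) =
        List.replicate (j + min m (n - (v * ((j : Int) + m) + j)).toNat) (v+1) ++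
        List.replicate (m - min m (n - (v * ((j : Int) + m) + j)).toNat) v := by
  intro m
  induction m with
  | zero => intro j; simp [pvA_incPass]
  | succ m ih =>
    intro j
    rw [List.range'_succ, pvA_incPass]
    have hsum : (List.replicate j (v+1) ++ List.replicate (m+1) v).sum
        = v * ((j : Int) + (m+1)) + j := by
      simp [List.sum_append]; ring
    push_cast
    by_cases h : v * ((j : Int) + ((m : Int)+1)) + j ≥ n
    · rw [if_pos (by rw [hsum]; push_cast; exact h)]
      rw [show min (m+1) (n - (v * ((j : Int) + ((m : Int)+1)) + j)).toNat = 0 from by omega]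
      simp
    · rw [if_neg (by rw [hsum]; push_cast; exact h), List.replicate_succ, getD_at_append,
          set_at_append,
          show List.replicate j (v+1) ++ (v+1) :: List.replicate m v
             = List.replicate (j+1) (v+1) ++ List.replicate m v from (repl_succ_append ..).symm,
          ih (j+1)]
      push_cast
      rw [show v * ((j : Int) + 1 + (m : Int)) = v * ((j : Int) + ((m : Int) + 1)) from by ring]
      generalize hX : v * ((j : Int) + ((m : Int) + 1)) = X at h ⊢
      congr 2 <;> omega

lemma decLoop_of_le (n : Int) (g fuel : Nat) (s : List Int) (h : ¬ s.sum > n) :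
    pvA_decLoop n g fuel s = s := by
  cases fuel <;> simp [pvA_decLoop, h]

lemma incLoop_of_ge (n : Int) (g fuel : Nat) (s : List Int) (h : ¬ s.sum < n) :
    pvA_incLoop n g fuel s = s := by
  cases fuel <;> simp [pvA_incLoop, h]

lemma decLoop_eq (n : Int) (g : Nat) (hg : 0 < g) (hng : (g : Int) ≤ n) :
    ∀ (fuel : Nat) (v : Int), 1 ≤ v → n ≤ v * g → (v * g - n).toNat < fuel →
      pvA_decLoop n g fuel (List.replicate g v) = pvSplit n (g : Int) := by
  intro fuel
  induction fuel with
  | zero => intro v _ _ h; omega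
  | succ f ih =>
    intro v hv1 hvn hfuel
    have hsum : (List.replicate g v).sum = v * (g : Int) := by
      rw [sum_replicate_int]; ring
    by_cases h : v * (g : Int) > n
    · have hv2 : 1 < v := by nlinarith
      rw [pvA_decLoop, if_pos (by rw [hsum]; exact h)]
      have hpass : pvA_decPass n g (List.replicate g v) =
          List.replicate (g - min g (v * g - n).toNat) v ++
          List.replicate (min g (v * g - n).toNat) (v - 1) := by
        rw [pvA_decPass, ← List.append_nil (List.replicate g v), decPass_core n v hv2 g []]
        simp
      by_cases hD : (g : Int) ≤ v * g - n
      · rw [hpass, show min g (v * (g:Int) - n).toNat = g from by omega]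
        simp only [Nat.sub_self, List.replicate_zero, List.nil_append, List.append_nil]
        rw [ih (v - 1) (by nlinarith) (by push_cast; linarith)
             (by rw [show ((v-1) * (g:Int) - n) = (v * g - n) - g from by ring]; omega)]
      · have hD0 : 0 < v * (g : Int) - n := by omega
        rw [hpass]
        set D : Nat := (v * (g:Int) - n).toNat with hDD
        rw [show min g D = D from by omega]
        have hDle : D ≤ g := by omega
        have hDint : (D : Int) = v * (g : Int) - n := by omega
        have hsum2 : (List.replicate (g - D) v ++ List.replicate D (v - 1)).sum = n := by
          rw [List.sum_append, sum_replicate_int, sum_replicate_int]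
          push_cast [hDle]
          rw [hDint]; ring
        rw [decLoop_of_le n g f _ (by rw [hsum2]; exact lt_irrefl n)]
        rw [pvSplit_eq n g (v - 1) ((g : Int) - D) (by exact_mod_cast hg) (by omega) (by omega)
             (by rw [hDint]; ring)]
        rw [show ((g : Int) - (D : Int)).toNat = g - D from by omega, sub_sub_cancel,
            Int.toNat_natCast, sub_add_cancel]
    · have : v * (g : Int) = n := le_antisymm (not_lt.mp h) hvn
      rw [decLoop_of_le n g (f+1) _ (by rw [hsum]; omega)]
      rw [pvSplit_eq n g v 0 (by exact_mod_cast hg) le_rfl (by exact_mod_cast hg) (by omega)]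
      simp

lemma incLoop_eq (n : Int) (g : Nat) (hg : 0 < g) :
    ∀ (fuel : Nat) (v : Int), v * g ≤ n → (n - v * g).toNat < fuel →
      pvA_incLoop n g fuel (List.replicate g v) = pvSplit n (g : Int) := by
  intro fuel
  induction fuel with
  | zero => intro v _ h; omega
  | succ f ih =>
    intro v hvn hfuel
    have hsum : (List.replicate g v).sum = v * (g : Int) := by
      rw [sum_replicate_int]; ring
    by_cases h : v * (g : Int) < n
    · rw [pvA_incLoop, if_pos (by rw [hsum]; exact h)]
      have hpass : pvA_incPass n (List.range g) (List.replicate g v) =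
          List.replicate (min g (n - v * g).toNat) (v+1) ++
          List.replicate (g - min g (n - v * g).toNat) v := by
        have h0 := incPass_core n v g 0
        simp only [List.replicate_zero, List.nil_append, Nat.cast_zero, zero_add, add_zero] at h0
        rw [List.range_eq_range', h0]
      by_cases hS : (g : Int) ≤ n - v * g
      · rw [hpass, show min g (n - v * (g:Int)).toNat = g from by omega]
        simp only [Nat.sub_self, List.replicate_zero, List.append_nil]
        rw [ih (v + 1) (by rw [show (v+1) * (g:Int) = v * g + g from by ring]; omega)
             (by rw [show (n - (v+1) * (g:Int)) = (n - v * g) - g from by ring]; omega)]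
      · have hS0 : 0 < n - v * (g : Int) := by omega
        rw [hpass]
        set S : Nat := (n - v * (g:Int)).toNat with hSS
        rw [show min g S = S from by omega]
        have hSle : S ≤ g := by omega
        have hSint : (S : Int) = n - v * (g : Int) := by omega
        have hsum2 : (List.replicate S (v+1) ++ List.replicate (g - S) v).sum = n := by
          rw [List.sum_append, sum_replicate_int, sum_replicate_int]
          push_cast [hSle]
          rw [hSint]; ring
        rw [incLoop_of_ge n g f _ (by rw [hsum2]; exact lt_irrefl n)]
        rw [pvSplit_eq n g v (S : Int) (by exact_mod_cast hg) (by omega) (by omega)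
             (by rw [hSint]; ring)]
        rw [Int.toNat_natCast, show ((g : Int) - (S : Int)).toNat = g - S from by omega]
    · have : v * (g : Int) = n := le_antisymm hvn (not_lt.mp h)
      rw [incLoop_of_ge n g (f+1) _ (by rw [hsum]; omega)]
      rw [pvSplit_eq n g v 0 (by exact_mod_cast hg) le_rfl (by exact_mod_cast hg) (by omega)]
      simp

-- ===== VERDICT (by name: the statement is the Claim_ definition above) =====
theorem balanced_partition_sizes_spec : Claim_equal_balanced_partition_sizes := by
  unfold Claim_equal_balanced_partition_sizes
  intro n g p _hDom hPre
  unfold Spec_balanced_partition_sizes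
  match p with
  | none =>
    rw [balanced_partition_sizes, default_eq_split, alt_eq_split]
  | some p =>
    by_cases hp : p ≤ 0
    · rw [balanced_partition_sizes, if_pos hp, default_eq_split, alt_eq_split]
    · rw [balanced_partition_sizes, if_neg hp]
      unfold Pre_balanced_partition_sizes at hPre
      simp only [Option.getD_some] at hPre
      by_cases hg : g ≤ 0
      · have hn : n = 0 := by
          rcases hPre with h | h
          · omega
          · rwa [if_pos hg] at h
        rw [Int.toNat_of_nonpos hg]
        simp [pvA_decLoop, pvA_incLoop, pvA_incPass, hn, alt_eq_split, hg]
      · push_neg at hg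
        have hgn : g ≤ n := by
          rcases hPre with h | h
          · omega
          · rwa [if_neg (not_le.mpr hg)] at h
        obtain ⟨k, rfl⟩ : ∃ k : Nat, g = (k : Int) := ⟨g.toNat, (Int.toNat_of_nonneg hg.le).symm⟩
        have hk : 0 < k := by exact_mod_cast hg
        rw [Int.toNat_natCast, alt_eq_split, if_neg (not_le.mpr hg)]
        show pvA_incLoop n k ((n - p * (k:Int)).toNat + 1)
               (pvA_decLoop n k ((p * (k:Int) - n).toNat + 1) (List.replicate k p)) =
             pvSplit n (k:Int)
        by_cases hcmp : n < p * (k : Int)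
        · rw [decLoop_eq n k hk hgn ((p * (k:Int) - n).toNat + 1) p (by omega) (by omega)
               (by omega)]
          exact incLoop_of_ge n k _ _ (by rw [pvSplit_sum n k (by exact_mod_cast hk)]
                                          exact lt_irrefl n)
        · rw [decLoop_of_le n k _ _ (by rw [sum_replicate_int, mul_comm]; exact hcmp)]
          exact incLoop_eq n k hk ((n - p * (k:Int)).toNat + 1) p (by omega) (by omega)
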